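-- pv_equiv track=rewrite | github.com/thdbar/THD-BAR | model/standard_1020_chorder.py | find_elements_in_sublists
-- ===== SOURCE A (Python) =====
-- def find_elements_in_sublists(list1, list2):
--     """
--     Check if elements from list2 exist in any sublist of list1 and return a corresponding boolean list.
--
--     Parameters:
--     - list1: A list containing multiple sublists.
--     - list2: A list of elements to check.
--
--     Returns:
--     - A boolean list indicating whether any sublist in list1 contains any element from list2.
--     """
--     result = []
--     for item in list2:
--         for idx, sublist in enumerate(list1):
--             if idx in result:
--                 continue
--             if item in sublist:
--                 result.append(idx)
--                 break  # Stop checking once a matching sublist is found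
--
--     bool_result = [idx in result for idx in range(len(list1))]
--     return bool_result
-- ===== SOURCE B (Python) =====
-- def find_elements_in_sublists(list1, list2):
--     """As A, but driven by list1: each sublist greedily consumes the first
--     remaining element of list2 it contains (equivalent greedy matching)."""
--     remaining = list(list2)
--     result = []
--     for sublist in list1:
--         p = next((k for k, x in enumerate(remaining) if x in sublist), None)
--         if p is None:
--             result.append(False)
--         else:
--             remaining.pop(p)
--             result.append(True)
--     return result
-- ===== Notes on version B (the rewrite author's own statement) =====
-- stated objective: alternative
-- what changed: B transposes the greedy matching: instead of assigning each element of list2 to the first not-yet-matched sublist containing it and then emitting a membership pass over range(len(list1)), B iterates over list1's sublists in order, each consuming the first remaining element of list2 it contains, emitting the boolean directly; the two index-priority greedies yield the same matched-sublist set.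
import Mathlib
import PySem

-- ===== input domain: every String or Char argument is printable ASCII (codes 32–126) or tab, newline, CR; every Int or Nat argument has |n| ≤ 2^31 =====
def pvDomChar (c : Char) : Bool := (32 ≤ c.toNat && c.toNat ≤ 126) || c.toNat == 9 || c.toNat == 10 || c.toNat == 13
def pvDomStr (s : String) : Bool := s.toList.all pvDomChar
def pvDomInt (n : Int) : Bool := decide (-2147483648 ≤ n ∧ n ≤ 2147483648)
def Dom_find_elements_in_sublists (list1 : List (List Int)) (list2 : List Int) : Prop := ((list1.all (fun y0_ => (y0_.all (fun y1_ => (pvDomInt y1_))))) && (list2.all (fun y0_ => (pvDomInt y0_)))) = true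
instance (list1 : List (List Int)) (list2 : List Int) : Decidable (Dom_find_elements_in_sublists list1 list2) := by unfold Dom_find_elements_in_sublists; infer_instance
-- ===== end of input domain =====

-- B transposes the greedy loops: it scans list1's sublists in order, each consuming the
-- first remaining element of list2 it contains (same matched sublists, alternative shape).

-- ===== PORT A =====
-- inner 'for idx, sublist in enumerate(list1)' loop with continue/break
def aInner (result : List Int) (item : Int) : List (Int × List Int) → List Int
  | [] => result
  | (idx, sublist) :: rest =>
    if idx ∈ result then aInner result item rest
    else if item ∈ sublist then result ++ [idx]
    else aInner result item rest

def find_elements_in_sublists (list1 : List (List Int)) (list2 : List Int) : List Bool :=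
  let result := list2.foldl (fun r item => aInner r item (PySem.List.enumerate list1)) []
  (PySem.List.pyRange 0 (list1.length : Int) 1).map (fun idx => decide (idx ∈ result))

-- ===== PORT B =====
-- 'next((k for k, x in enumerate(remaining) if x in sublist), None)'; the enumerate
-- index is represented as a Nat (exact: enumerate indices are nonnegative)
def bFirst (sublist : List Int) : List Int → Option Nat
  | [] => none
  | x :: rest => if x ∈ sublist then some 0 else (bFirst sublist rest).map (· + 1)

-- the 'for sublist in list1' loop; 'remaining.pop(p)' is eraseIdx p on the remaining items
def find_elements_in_sublists_alt (list1 : List (List Int)) (list2 : List Int) : List Bool :=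
  match list1 with
  | [] => []
  | s :: rest =>
    match bFirst s list2 with
    | none => false :: find_elements_in_sublists_alt rest list2
    | some p => true :: find_elements_in_sublists_alt rest (list2.eraseIdx p)

-- ===== PRECONDITION & SPEC =====
def Spec_find_elements_in_sublists (list1 : List (List Int)) (list2 : List Int) (out : List Bool) : Prop := out = find_elements_in_sublists_alt list1 list2
instance (list1 : List (List Int)) (list2 : List Int) (out : List Bool) : Decidable (Spec_find_elements_in_sublists list1 list2 out) := by unfold Spec_find_elements_in_sublists; infer_instance

-- ===== CLAIM (what is proved, stated in full; the proofs are below) =====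
def Claim_equal_find_elements_in_sublists : Prop := ∀ (list1 : List (List Int)) (list2 : List Int), Dom_find_elements_in_sublists list1 list2 → Spec_find_elements_in_sublists list1 list2 (find_elements_in_sublists list1 list2)

-- ===== LEMMAS AND PROOFS =====

-- A's accumulated matched-index list, run from an arbitrary start state R
def foldA (L1 : List (List Int)) (R : List Int) (items : List Int) : List Int :=
  items.foldl (fun r item => aInner r item (PySem.List.enumerate L1)) R

-- R is R' with every index shifted up by one (membership view, on nonnegative indices)
def Shifted (R R' : List Int) : Prop := ∀ k : Int, 0 ≤ k → ((k + 1) ∈ R ↔ k ∈ R')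

theorem enumerate_shift (xs : List (List Int)) (s : Int) :
    PySem.List.enumerate xs (s + 1) = (PySem.List.enumerate xs s).map (fun p => (p.1 + 1, p.2)) := by
  induction xs generalizing s with
  | nil => simp [PySem.List.enumerate_nil]
  | cons x xs ih => simp [PySem.List.enumerate_cons, ih]

theorem aInner_shift (pairs : List (Int × List Int)) (item : Int) (R R' : List Int)
    (hnn : ∀ p ∈ pairs, 0 ≤ p.1) (hb : Shifted R R') :
    Shifted (aInner R item (pairs.map (fun p => (p.1 + 1, p.2)))) (aInner R' item pairs) ∧
      ((0 : Int) ∈ aInner R item (pairs.map (fun p => (p.1 + 1, p.2))) ↔ (0 : Int) ∈ R) := by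
  induction pairs generalizing R R' with
  | nil => exact ⟨hb, Iff.rfl⟩
  | cons q rest ih =>
    obtain ⟨idx, sub⟩ := q
    have hidx : 0 ≤ idx := hnn (idx, sub) (List.mem_cons_self ..)
    have hrest : ∀ p ∈ rest, 0 ≤ p.1 := fun p hp => hnn p (List.mem_cons_of_mem _ hp)
    by_cases hmem : (idx + 1) ∈ R
    · have hmem' : idx ∈ R' := (hb idx hidx).mp hmem
      simpa [aInner, hmem, hmem'] using ih R R' hrest hb
    · have hmem' : idx ∉ R' := fun h => hmem ((hb idx hidx).mpr h)
      by_cases hit : item ∈ sub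
      · have hL : aInner R item (((idx, sub) :: rest).map (fun p => (p.1 + 1, p.2))) =
            R ++ [idx + 1] := by
          simp [aInner, hmem, hit]
        have hR : aInner R' item ((idx, sub) :: rest) = R' ++ [idx] := by
          simp [aInner, hmem', hit]
        rw [hL, hR]
        refine ⟨?_, ?_⟩
        · intro k hk
          simp only [List.mem_append, List.mem_singleton]
          constructor
          · rintro (h | h)
            · exact Or.inl ((hb k hk).mp h)
            · exact Or.inr (by omega)
          · rintro (h | h)
            · exact Or.inl ((hb k hk).mpr h)
            · exact Or.inr (by omega)
        · simp only [List.mem_append, List.mem_singleton]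
          constructor
          · rintro (h | h)
            · exact h
            · omega
          · exact Or.inl
      · simpa [aInner, hmem, hmem', hit] using ih R R' hrest hb

theorem enumerate_fst_nonneg (xs : List (List Int)) (s : Int) :
    ∀ p ∈ PySem.List.enumerate xs s, s ≤ p.1 := by
  induction xs generalizing s with
  | nil => simp [PySem.List.enumerate_nil]
  | cons x xs ih =>
    intro p hp
    rw [PySem.List.enumerate_cons] at hp
    rcases List.mem_cons.mp hp with h | h
    · simp [h]
    · have := ih (s + 1) p h
      omega

-- one step of A's outer loop on (s :: L1), in shifted correspondence with the same step on L1
theorem step_shift (s : List Int) (L1 : List (List Int)) (item : Int) (R R' : List Int)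
    (h0 : (0 : Int) ∈ R ∨ item ∉ s) (hb : Shifted R R') :
    Shifted (aInner R item (PySem.List.enumerate (s :: L1))) (aInner R' item (PySem.List.enumerate L1)) ∧
      ((0 : Int) ∈ aInner R item (PySem.List.enumerate (s :: L1)) ↔ (0 : Int) ∈ R) := by
  have he : PySem.List.enumerate (s :: L1) =
      (0, s) :: (PySem.List.enumerate L1 0).map (fun p => (p.1 + 1, p.2)) := by
    rw [PySem.List.enumerate_cons]
    congr 1
    simpa using enumerate_shift L1 0
  have hA := aInner_shift (PySem.List.enumerate L1 0) item R R'
    (fun p hp => enumerate_fst_nonneg L1 0 p hp) hb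
  rcases h0 with h0 | h0
  · rw [he]; simpa [aInner, h0] using hA
  · by_cases hm : (0 : Int) ∈ R
    · rw [he]; simpa [aInner, hm] using hA
    · rw [he]; simpa [aInner, hm, h0] using hA

-- phase 2: once sublist 0 is matched, the run on (s :: L1) shadows the run on L1
theorem lemA2 (items : List Int) (s : List Int) (L1 : List (List Int)) (R R' : List Int)
    (h0 : (0 : Int) ∈ R) (hb : Shifted R R') :
    (0 : Int) ∈ foldA (s :: L1) R items ∧ Shifted (foldA (s :: L1) R items) (foldA L1 R' items) := by
  induction items generalizing R R' with
  | nil => exact ⟨h0, hb⟩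
  | cons i items ih =>
    have hstep := step_shift s L1 i R R' (Or.inl h0) hb
    have h0' : (0 : Int) ∈ aInner R i (PySem.List.enumerate (s :: L1)) := hstep.2.mpr h0
    simpa [foldA, List.foldl_cons] using ih _ _ h0' hstep.1

-- phase 1, no element of items lies in s: sublist 0 stays unmatched
theorem lemA1_none (items : List Int) (s : List Int) (L1 : List (List Int)) (R R' : List Int)
    (hf : bFirst s items = none) (h0 : (0 : Int) ∉ R) (hb : Shifted R R') :
    (0 : Int) ∉ foldA (s :: L1) R items ∧ Shifted (foldA (s :: L1) R items) (foldA L1 R' items) := by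
  induction items generalizing R R' with
  | nil => exact ⟨h0, hb⟩
  | cons i items ih =>
    by_cases his : i ∈ s
    · simp [bFirst, his] at hf
    · have hf' : bFirst s items = none := by
        simpa [bFirst, his] using hf
      have hstep := step_shift s L1 i R R' (Or.inr his) hb
      have h0' : (0 : Int) ∉ aInner R i (PySem.List.enumerate (s :: L1)) := fun h =>
        h0 (hstep.2.mp h)
      simpa [foldA, List.foldl_cons] using ih _ _ hf' h0' hstep.1

-- phase 1 → 2: the first element of items lying in s matches sublist 0; afterwards the
-- run on (s :: L1) shadows the run of L1 on items with that element removed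
theorem lemA1_some (items : List Int) (s : List Int) (L1 : List (List Int)) (p : Nat)
    (R R' : List Int) (hf : bFirst s items = some p) (h0 : (0 : Int) ∉ R) (hb : Shifted R R') :
    (0 : Int) ∈ foldA (s :: L1) R items ∧
      Shifted (foldA (s :: L1) R items) (foldA L1 R' (items.eraseIdx p)) := by
  induction items generalizing R R' p with
  | nil => simp [bFirst] at hf
  | cons i items ih =>
    by_cases his : i ∈ s
    · have hp : (0 : Nat) = p := by simpa [bFirst, his] using hf
      subst hp
      -- first matching element: A appends index 0, then phase 2
      have hstep : aInner R i (PySem.List.enumerate (s :: L1)) = R ++ [0] := by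
        rw [PySem.List.enumerate_cons]
        simp [aInner, h0, his]
      have hb' : Shifted (R ++ [(0 : Int)]) R' := by
        intro k hk
        simp only [List.mem_append, List.mem_singleton]
        constructor
        · rintro (h | h)
          · exact (hb k hk).mp h
          · omega
        · intro h; exact Or.inl ((hb k hk).mpr h)
      have h0' : (0 : Int) ∈ R ++ [(0 : Int)] := by simp
      have hfold : foldA (s :: L1) R (i :: items) = foldA (s :: L1) (R ++ [0]) items := by
        unfold foldA
        rw [List.foldl_cons, hstep]
      rw [hfold]
      simpa [List.eraseIdx_cons_zero] using lemA2 items s L1 (R ++ [0]) R' h0' hb'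
    · obtain ⟨q, hq, hpq⟩ : ∃ q, bFirst s items = some q ∧ p = q + 1 := by
        have : (bFirst s items).map (· + 1) = some p := by simpa [bFirst, his] using hf
        cases hbf : bFirst s items with
        | none => rw [hbf] at this; simp at this
        | some q => rw [hbf] at this; simp at this; exact ⟨q, rfl, this.symm⟩
      subst hpq
      have hstep := step_shift s L1 i R R' (Or.inr his) hb
      have h0' : (0 : Int) ∉ aInner R i (PySem.List.enumerate (s :: L1)) := fun h =>
        h0 (hstep.2.mp h)
      have := ih q _ _ hq h0' hstep.1
      simpa [foldA, List.foldl_cons, List.eraseIdx_cons_succ] using this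

-- boolean output of A on (s :: L1): head from membership of 0, tail through Shifted
theorem output_cons (n : Nat) (Rf Rf' : List Int) (hb : Shifted Rf Rf') :
    (PySem.List.pyRange 0 ((n : Int) + 1) 1).map (fun idx => decide (idx ∈ Rf)) =
      decide ((0 : Int) ∈ Rf) ::
        (PySem.List.pyRange 0 (n : Int) 1).map (fun idx => decide (idx ∈ Rf')) := by
  rw [PySem.List.pyRange_one_cons (by omega : (0 : Int) < (n : Int) + 1)]
  rw [PySem.List.pyRange_one, PySem.List.pyRange_one]
  have h1 : (((n : Int) + 1) - (0 + 1)).toNat = n := by omega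
  have h2 : ((n : Int) - 0).toNat = n := by omega
  rw [h1, h2]
  simp only [List.map_cons, List.map_map]
  congr 1
  apply List.map_congr_left
  intro k _
  have := hb (k : Int) (by positivity)
  simp only [Function.comp]
  have e1 : (0 : Int) + 1 + (k : Int) = (k : Int) + 1 := by ring
  have e2 : (0 : Int) + (k : Int) = (k : Int) := by ring
  simp only [e1, e2]
  exact decide_eq_decide.mpr this

theorem main_equiv (L1 : List (List Int)) (items : List Int) :
    find_elements_in_sublists L1 items = find_elements_in_sublists_alt L1 items := by
  induction L1 generalizing items with
  | nil =>
    simp [find_elements_in_sublists, find_elements_in_sublists_alt]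
  | cons s L1 ih =>
    have hA : find_elements_in_sublists (s :: L1) items =
        (PySem.List.pyRange 0 ((L1.length : Int) + 1) 1).map
          (fun idx => decide (idx ∈ foldA (s :: L1) [] items)) := by
      simp [find_elements_in_sublists, foldA]
    have hA' : ∀ (l2 : List Int), find_elements_in_sublists L1 l2 =
        (PySem.List.pyRange 0 (L1.length : Int) 1).map
          (fun idx => decide (idx ∈ foldA L1 [] l2)) := by
      intro l2; simp [find_elements_in_sublists, foldA]
    cases hbf : bFirst s items with
    | none =>
      have h := lemA1_none items s L1 [] [] hbf (by simp) (by intro k _; simp)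
      rw [hA, output_cons L1.length _ _ h.2]
      simp only [find_elements_in_sublists_alt, hbf]
      rw [← hA', ih items]
      simp [h.1]
    | some p =>
      have h := lemA1_some items s L1 p [] [] hbf (by simp) (by intro k _; simp)
      rw [hA, output_cons L1.length _ _ h.2]
      simp only [find_elements_in_sublists_alt, hbf]
      rw [← hA', ih (items.eraseIdx p)]
      simp [h.1]

-- ===== VERDICT (by name: the statement is the Claim_ definition above) =====
theorem find_elements_in_sublists_spec : Claim_equal_find_elements_in_sublists := by
  intro list1 list2 _
  unfold Spec_find_elements_in_sublists
  exact main_equiv list1 list2
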